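-- pv_equiv track=rewrite | github.com/gunh0906/orchestrator | dashboard.py | _activity_from_log
-- ===== SOURCE A (Python) =====
-- def _activity_from_log(log_text: str) -> str:
--     text = (log_text or "").replace("\r", "")
--     if not text.strip():
--         return "idle"
--     skip = (
--         "tokens used",
--         "thinking",
--         "plan update",
--         "exec",
--         "codex",
--         "success.",
--         "done",
--         "completed",
--     )
--     for raw in reversed(text.splitlines()):
--         line = raw.strip()
--         if not line:
--             continue
--         low = line.lower()
--         if any(low == s or low.startswith(s + " ") for s in skip):
--             continue
--         if line.startswith(("```", "---", "===", "**")):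
--             continue
--         if len(line) > 88:
--             line = line[:85] + "..."
--         return line
--     return "running"
-- ===== SOURCE B (Python) =====
-- def _interesting(line):
--     low = line.lower()
--     for s in ("tokens used", "thinking", "plan update", "exec",
--               "codex", "success.", "done", "completed"):
--         if low == s or low.startswith(s + " "):
--             return False
--     for p in ("```", "---", "===", "**"):
--         if line.startswith(p):
--             return False
--     return True
--
--
-- def _activity_from_log(log_text: str) -> str:
--     text = (log_text or "").replace("\r", "")
--     if not text.strip():
--         return "idle"
--     stripped = [raw.strip() for raw in text.splitlines()]
--     kept = [l for l in stripped if l and _interesting(l)]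
--     shown = [l[:85] + "..." if len(l) > 88 else l for l in kept]
--     return shown[-1] if shown else "running"
-- ===== Notes on version B (the rewrite author's own statement) =====
-- stated objective: alternative
-- what changed: Replaced the reverse scan with early-exit return by a staged pipeline: strip all lines, filter the interesting ones (filter written as explicit loops over the skip/prefix tuples instead of any()), truncate, and take the last element of the resulting list, falling back to the default status when it is empty.
import Mathlib
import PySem

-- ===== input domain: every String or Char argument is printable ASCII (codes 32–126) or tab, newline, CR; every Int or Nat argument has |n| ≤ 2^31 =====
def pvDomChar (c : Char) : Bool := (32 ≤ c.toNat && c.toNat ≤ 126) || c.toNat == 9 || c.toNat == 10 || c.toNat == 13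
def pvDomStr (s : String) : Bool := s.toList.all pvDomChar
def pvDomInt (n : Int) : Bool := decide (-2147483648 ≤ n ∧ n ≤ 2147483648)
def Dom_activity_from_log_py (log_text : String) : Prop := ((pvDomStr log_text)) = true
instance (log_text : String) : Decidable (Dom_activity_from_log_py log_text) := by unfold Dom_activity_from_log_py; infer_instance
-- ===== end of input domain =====

-- B replaces A's reversed scan with early-exit return by a staged pipeline (strip all lines,
-- filter with explicit loops over the skip/prefix tuples, truncate, take the last element);
-- objective: alternative decomposition, same cost.

-- ===== PORT A =====
-- A's per-line body: strip, skip blanks / skip-tuple matches / bad prefixes, truncate; first hit returns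
def pvLineA (raw : List Char) : Option (List Char) :=
  let line := PySem.Chars.strip raw
  if line = [] then none
  else
    let low := PySem.Chars.lower line
    if ["tokens used".toList, "thinking".toList, "plan update".toList, "exec".toList,
        "codex".toList, "success.".toList, "done".toList, "completed".toList].any
         (fun s => low == s || PySem.Chars.startswith low (s ++ [' '])) then none
    else if ["```".toList, "---".toList, "===".toList, "**".toList].any
              (fun p => PySem.Chars.startswith line p) then none
    else some (if line.length > 88 then PySem.Chars.slice line none (some (85 : Int)) ++ "...".toList else line)

-- A: scan the reversed line list, returning at the first line pvLineA accepts
def pvScanA : List (List Char) → String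
  | [] => "running"
  | raw :: rest =>
    match pvLineA raw with
    | some l => String.ofList l
    | none => pvScanA rest

def activity_from_log_py (log_text : String) : String :=
  let text := PySem.Chars.replace log_text.toList "\r".toList "".toList
  if PySem.Chars.strip text = [] then "idle"
  else pvScanA (PySem.Chars.splitlines text).reverse

-- ===== PORT B =====
-- Source B's _interesting: explicit loop over the skip tuple …
def pvNotSkipped : List (List Char) → List Char → Bool
  | [], _ => true
  | s :: rest, low =>
    if low == s || PySem.Chars.startswith low (s ++ [' ']) then false
    else pvNotSkipped rest low

-- … then an explicit loop over the prefix tuple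
def pvNoBadPrefix : List (List Char) → List Char → Bool
  | [], _ => true
  | p :: rest, line =>
    if PySem.Chars.startswith line p then false else pvNoBadPrefix rest line

def pvInteresting (line : List Char) : Bool :=
  pvNotSkipped
    ["tokens used".toList, "thinking".toList, "plan update".toList, "exec".toList,
     "codex".toList, "success.".toList, "done".toList, "completed".toList]
    (PySem.Chars.lower line)
  && pvNoBadPrefix ["```".toList, "---".toList, "===".toList, "**".toList] line

-- the truncation comprehension's body
def pvShow (l : List Char) : List Char :=
  if l.length > 88 then PySem.Chars.slice l none (some (85 : Int)) ++ "...".toList else l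

def activity_from_log_py_alt (log_text : String) : String :=
  let text := PySem.Chars.replace log_text.toList "\r".toList "".toList
  if PySem.Chars.strip text = [] then "idle"
  else
    let stripped := (PySem.Chars.splitlines text).map PySem.Chars.strip
    let kept := stripped.filter (fun l => !l.isEmpty && pvInteresting l)
    let shown := kept.map pvShow
    match shown.getLast? with
    | some l => String.ofList l
    | none => "running"

-- ===== PRECONDITION & SPEC =====
def Spec_activity_from_log_py (log_text : String) (out : String) : Prop := out = activity_from_log_py_alt log_text
instance (log_text : String) (out : String) : Decidable (Spec_activity_from_log_py log_text out) := by unfold Spec_activity_from_log_py; infer_instance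

-- ===== CLAIM (what is proved, stated in full; the proofs are below) =====
def Claim_equal_activity_from_log_py : Prop := ∀ (log_text : String), Dom_activity_from_log_py log_text → Spec_activity_from_log_py log_text (activity_from_log_py log_text)

-- ===== LEMMAS AND PROOFS =====

lemma pvNotSkipped_eq_any (ss : List (List Char)) (low : List Char) :
    pvNotSkipped ss low = !(ss.any fun s => low == s || PySem.Chars.startswith low (s ++ [' '])) := by
  induction ss with
  | nil => rfl
  | cons s rest ih => by_cases h : (low == s || PySem.Chars.startswith low (s ++ [' '])) = true <;>
      simp [pvNotSkipped, h, ih]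

lemma pvNoBadPrefix_eq_any (ps : List (List Char)) (line : List Char) :
    pvNoBadPrefix ps line = !(ps.any fun p => PySem.Chars.startswith line p) := by
  induction ps with
  | nil => rfl
  | cons p rest ih => by_cases h : PySem.Chars.startswith line p <;> simp [pvNoBadPrefix, h, ih]

-- B's pipeline step agrees pointwise with A's per-line body
lemma pvLineA_eq_step (raw : List Char) :
    pvLineA raw =
      (if !(PySem.Chars.strip raw).isEmpty && pvInteresting (PySem.Chars.strip raw)
       then some (pvShow (PySem.Chars.strip raw)) else none) := by
  unfold pvLineA pvInteresting pvShow
  simp only [pvNotSkipped_eq_any, pvNoBadPrefix_eq_any]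
  split_ifs with h1 h2 h3 <;> simp_all

-- B's three staged passes collapse to filterMap pvLineA
lemma pipeline_eq (ls : List (List Char)) :
    ((ls.map PySem.Chars.strip).filter (fun l => !l.isEmpty && pvInteresting l)).map pvShow
      = ls.filterMap pvLineA := by
  induction ls with
  | nil => rfl
  | cons raw rest ih =>
    simp only [List.map_cons, List.filter_cons, List.filterMap_cons, pvLineA_eq_step raw]
    by_cases h : (!(PySem.Chars.strip raw).isEmpty && pvInteresting (PySem.Chars.strip raw)) = true <;>
      simp [h, ih]

-- A's early-exit scan returns the head of the filterMap
lemma pvScanA_eq_head (ms : List (List Char)) :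
    pvScanA ms = (match (ms.filterMap pvLineA).head? with
                  | some l => String.ofList l
                  | none => "running") := by
  induction ms with
  | nil => rfl
  | cons raw rest ih =>
    simp only [pvScanA, List.filterMap_cons]
    cases h : pvLineA raw <;> simp [ih]

theorem activity_from_log_py_spec : Claim_equal_activity_from_log_py := by
  intro log_text _
  unfold Spec_activity_from_log_py activity_from_log_py activity_from_log_py_alt
  simp only [pipeline_eq, pvScanA_eq_head, List.filterMap_reverse, List.head?_reverse]
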